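-- pv_equiv track=rewrite | github.com/owais-ch/Arrays | Balance Array.py | solve
-- ===== SOURCE A (Python) =====
-- def solve(A):
--     length=len(A)
--
--     even_total=sum([A[i] for i in range(length) if i%2==0])
--
--     odd_total=sum(A)-even_total
--
--     prefix_odd=0
--     prefix_even=0
--
--     suffix_odd=odd_total
--     suffix_even=even_total
--
--     count=0
--
--     for i in range(length):
--         if i%2==0:
--             suffix_even=suffix_even-A[i]
--             if i>0:
--                 prefix_odd+=A[i-1]
--
--         else:
--             suffix_odd=suffix_odd-A[i]
--             if i>0:
--                 prefix_even+=A[i-1]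
--
--         if prefix_odd+suffix_even==prefix_even+suffix_odd:
--             count+=1
--
--     return count
-- ===== SOURCE B (Python) =====
-- def split_sums(xs):
--     # (sum of elements at even positions, sum at odd positions)
--     e, o = 0, 0
--     for x in reversed(xs):
--         e, o = x + o, e
--     return (e, o)
--
-- def solve(A):
--     count = 0
--     for i in range(len(A)):
--         e, o = split_sums(A[:i] + A[i+1:])
--         if e == o:
--             count += 1
--     return count
-- ===== Notes on version B (the rewrite author's own statement) =====
-- stated objective: simpler
-- what changed: A's single online pass with prefix/suffix even-odd accumulators is replaced by a brute-force recompute: for each index i, B rebuilds the list without element i and directly compares its even-position and odd-position sums.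
import Mathlib
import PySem

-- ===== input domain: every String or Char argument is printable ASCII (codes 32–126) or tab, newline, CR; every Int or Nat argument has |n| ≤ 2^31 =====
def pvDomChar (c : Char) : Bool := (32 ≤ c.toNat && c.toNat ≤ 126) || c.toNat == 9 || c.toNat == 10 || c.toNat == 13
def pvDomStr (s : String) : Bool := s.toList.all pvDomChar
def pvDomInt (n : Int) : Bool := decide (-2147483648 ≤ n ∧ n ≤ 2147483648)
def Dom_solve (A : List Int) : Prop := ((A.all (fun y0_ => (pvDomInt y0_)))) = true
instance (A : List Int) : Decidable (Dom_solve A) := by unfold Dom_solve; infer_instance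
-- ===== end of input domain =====

-- B replaces A's online prefix/suffix pass by a brute-force recompute: for each i it rebuilds the
-- list without element i and compares that list's even/odd position sums (objective: simpler).

-- ===== PORT A =====
-- loop body of A's for-loop, named for the proofs; indices from range(len(A)) are in range, so pyGetD is exact
def stepA (A : List Int) (s : Int × Int × Int × Int × Int) (i : Int) : Int × Int × Int × Int × Int :=
  let s4 : Int × Int × Int × Int :=
    if PySem.Int.mod i 2 = 0 then
      let suffix_even := s.2.2.2.1 - PySem.List.pyGetD A i 0
      let prefix_odd := if i > 0 then s.1 + PySem.List.pyGetD A (i - 1) 0 else s.1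
      (prefix_odd, s.2.1, s.2.2.1, suffix_even)
    else
      let suffix_odd := s.2.2.1 - PySem.List.pyGetD A i 0
      let prefix_even := if i > 0 then s.2.1 + PySem.List.pyGetD A (i - 1) 0 else s.2.1
      (s.1, prefix_even, suffix_odd, s.2.2.2.1)
  let count := if s4.1 + s4.2.2.2 = s4.2.1 + s4.2.2.1 then s.2.2.2.2 + 1 else s.2.2.2.2
  (s4.1, s4.2.1, s4.2.2.1, s4.2.2.2, count)

def solve (A : List Int) : Int :=
  let length : Int := (A.length : Int)
  let even_total : Int :=
    (((PySem.List.pyRange 0 length 1).filter (fun i => PySem.Int.mod i 2 = 0)).map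
      (fun i => PySem.List.pyGetD A i 0)).sum
  let odd_total : Int := A.sum - even_total
  let st := (PySem.List.pyRange 0 length 1).foldl (stepA A) (0, 0, odd_total, even_total, 0)
  st.2.2.2.2

-- ===== PORT B =====
def splitSums (xs : List Int) : Int × Int :=
  xs.reverse.foldl (fun p x => (x + p.2, p.1)) (0, 0)

-- loop body of B's for-loop, named for the proofs
def stepB (A : List Int) (count : Int) (i : Int) : Int :=
  let B := PySem.List.slice A none (some i) ++ PySem.List.slice A (some (i + 1)) none
  let p := splitSums B
  if p.1 = p.2 then count + 1 else count

def solve_alt (A : List Int) : Int :=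
  (PySem.List.pyRange 0 ((A.length : Int)) 1).foldl (stepB A) 0

-- ===== PRECONDITION & SPEC =====
def Spec_solve (A : List Int) (out : Int) : Prop := out = solve_alt A
instance (A : List Int) (out : Int) : Decidable (Spec_solve A out) := by unfold Spec_solve; infer_instance

-- ===== CLAIM (what is proved, stated in full; the proofs are below) =====
def Claim_equal_solve : Prop := ∀ (A : List Int), Dom_solve A → Spec_solve A (solve A)

-- ===== LEMMAS AND PROOFS =====

-- condition checked by A at iteration i (after its in-loop updates), in closed form
abbrev CondA (A : List Int) (i : Nat) : Prop :=
  (splitSums (A.take i)).2 + ((splitSums A).1 - (splitSums (A.take (i + 1))).1)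
    = (splitSums (A.take i)).1 + ((splitSums A).2 - (splitSums (A.take (i + 1))).2)

-- condition checked by B at iteration i, in closed form
abbrev CondB (A : List Int) (i : Nat) : Prop :=
  (splitSums (A.take i ++ A.drop (i + 1))).1 = (splitSums (A.take i ++ A.drop (i + 1))).2

-- flattened form of stepA, convenient for the proofs
theorem stepA_eq (A : List Int) (s : Int × Int × Int × Int × Int) (i : Int) :
    stepA A s i =
      if PySem.Int.mod i 2 = 0 then
        ((if i > 0 then s.1 + PySem.List.pyGetD A (i - 1) 0 else s.1), s.2.1, s.2.2.1,
         s.2.2.2.1 - PySem.List.pyGetD A i 0,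
         if (if i > 0 then s.1 + PySem.List.pyGetD A (i - 1) 0 else s.1)
              + (s.2.2.2.1 - PySem.List.pyGetD A i 0) = s.2.1 + s.2.2.1
           then s.2.2.2.2 + 1 else s.2.2.2.2)
      else
        (s.1, (if i > 0 then s.2.1 + PySem.List.pyGetD A (i - 1) 0 else s.2.1),
         s.2.2.1 - PySem.List.pyGetD A i 0, s.2.2.2.1,
         if s.1 + s.2.2.2.1 = (if i > 0 then s.2.1 + PySem.List.pyGetD A (i - 1) 0 else s.2.1)
              + (s.2.2.1 - PySem.List.pyGetD A i 0)
           then s.2.2.2.2 + 1 else s.2.2.2.2) := by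
  unfold stepA
  by_cases h : PySem.Int.mod i 2 = 0
  · simp only [if_pos h]
  · simp only [if_neg h]

theorem splitSums_nil : splitSums [] = (0, 0) := rfl

theorem splitSums_cons (x : Int) (xs : List Int) :
    splitSums (x :: xs) = (x + (splitSums xs).2, (splitSums xs).1) := by
  simp [splitSums, List.reverse_cons, List.foldl_append]

theorem modcast (j : Nat) : PySem.Int.mod (j : Int) 2 = ((j % 2 : Nat) : Int) := by
  exact_mod_cast PySem.Int.mod_natCast j 2

theorem splitSums_append (l m : List Int) :
    splitSums (l ++ m) =
      if l.length % 2 = 0 then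
        ((splitSums l).1 + (splitSums m).1, (splitSums l).2 + (splitSums m).2)
      else
        ((splitSums l).1 + (splitSums m).2, (splitSums l).2 + (splitSums m).1) := by
  induction l with
  | nil => simp [splitSums_nil]
  | cons x l ih =>
    by_cases h : l.length % 2 = 0
    · have h1 : (l.length + 1) % 2 ≠ 0 := by omega
      simp [splitSums_cons, ih, h, h1, Prod.ext_iff]
      omega
    · have h1 : (l.length + 1) % 2 = 0 := by omega
      simp [splitSums_cons, ih, h, h1, Prod.ext_iff]
      omega

theorem splitSums_sum (l : List Int) : (splitSums l).1 + (splitSums l).2 = l.sum := by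
  induction l with
  | nil => simp [splitSums_nil]
  | cons x l ih => simp [splitSums_cons]; omega

theorem ss_take_succ (A : List Int) (k : Nat) (h : k < A.length) :
    splitSums (A.take (k + 1)) =
      if k % 2 = 0 then
        ((splitSums (A.take k)).1 + A.getD k 0, (splitSums (A.take k)).2)
      else
        ((splitSums (A.take k)).1, (splitSums (A.take k)).2 + A.getD k 0) := by
  have ht : A.take (k + 1) = A.take k ++ [A.getD k 0] := by
    rw [List.take_add_one]
    congr 1
    simp [List.getElem?_eq_getElem h, List.getD_eq_getElem?_getD]
  rw [ht, splitSums_append]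
  have hl : (A.take k).length = k := by simp; omega
  by_cases hk : k % 2 = 0 <;> simp [hl, hk, splitSums_cons, splitSums_nil]

theorem even_total_eq (A : List Int) (k : Nat) (hk : k ≤ A.length) :
    (((List.range k).filter (fun j => j % 2 = 0)).map (fun j => A.getD j 0)).sum
      = (splitSums (A.take k)).1 := by
  induction k with
  | zero => simp [splitSums_nil]
  | succ k ih =>
    rw [List.range_succ, List.filter_append, List.map_append, List.sum_append,
      ih (by omega), ss_take_succ A k (by omega)]
    by_cases h : k % 2 = 0 <;> simp [h]

theorem foldB (A : List Int) (k : Nat) (hk : k ≤ A.length) :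
    (List.map (fun j : Nat => (j : Int)) (List.range k)).foldl (stepB A) 0
      = ((List.range k).countP (fun i => decide (CondB A i)) : Int) := by
  induction k with
  | zero => simp
  | succ k ih =>
    rw [List.range_succ, List.map_append, List.foldl_append, ih (by omega)]
    have h1 : PySem.List.slice A none (some (k : Int)) = A.take k :=
      PySem.List.slice_to_natCast ..
    have h2 : PySem.List.slice A (some ((k : Int) + 1)) none = A.drop (k + 1) := by
      have h3 : ((k : Int) + 1) = ((k + 1 : Nat) : Int) := by push_cast; ring
      rw [h3, PySem.List.slice_from_natCast]
    simp only [List.map_cons, List.map_nil, List.foldl_cons, List.foldl_nil, stepB, h1, h2,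
      List.countP_append, List.countP_cons, List.countP_nil]
    by_cases h : CondB A k
    · rw [if_pos (by unfold CondB at h; exact h)]
      simp [h]
    · rw [if_neg (by unfold CondB at h; exact h)]
      simp [h]

theorem condA_iff_condB (A : List Int) (i : Nat) (h : i < A.length) :
    CondA A i ↔ CondB A i := by
  have hsplit : A = A.take (i + 1) ++ A.drop (i + 1) := (List.take_append_drop _ _).symm
  have hl1 : (A.take (i + 1)).length = i + 1 := by simp; omega
  have hl0 : (A.take i).length = i := by simp; omega
  have hA : splitSums A = splitSums (A.take (i + 1) ++ A.drop (i + 1)) := by rw [← hsplit]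
  rw [splitSums_append, hl1] at hA
  have hts := ss_take_succ A i h
  unfold CondA CondB
  rw [splitSums_append, hl0]
  by_cases hp : i % 2 = 0
  · have hp1 : (i + 1) % 2 ≠ 0 := by omega
    rw [if_neg hp1] at hA
    rw [if_pos hp] at hts ⊢
    rw [hA, hts]
    simp [Prod.ext_iff] at *
    omega
  · have hp1 : (i + 1) % 2 = 0 := by omega
    rw [if_pos hp1] at hA
    rw [if_neg hp] at hts ⊢
    rw [hA, hts]
    simp [Prod.ext_iff] at *
    omega

-- closed form for A's loop state after k iterations
theorem foldA (A : List Int) (k : Nat) (hk : k ≤ A.length) :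
    (List.map (fun j : Nat => (j : Int)) (List.range k)).foldl (stepA A)
      (0, 0, (splitSums A).2, (splitSums A).1, 0)
    = ((splitSums (A.take (k - 1))).2,
       (splitSums (A.take (k - 1))).1,
       (splitSums A).2 - (splitSums (A.take k)).2,
       (splitSums A).1 - (splitSums (A.take k)).1,
       ((List.range k).countP (fun i => decide (CondA A i)) : Int)) := by
  induction k with
  | zero => simp [splitSums_nil]
  | succ k ih =>
    have hklt : k < A.length := by omega
    rw [List.range_succ, List.map_append, List.foldl_append, ih (by omega)]
    simp only [List.map_cons, List.map_nil, List.foldl_cons, List.foldl_nil,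
      List.countP_append, List.countP_cons, List.countP_nil, Nat.add_sub_cancel]
    have hts := ss_take_succ A k hklt
    rw [stepA_eq, modcast k]
    simp only [PySem.List.pyGetD_natCast]
    by_cases hp : k % 2 = 0
    · have hc0 : ((k % 2 : Nat) : Int) = 0 := by exact_mod_cast hp
      rw [if_pos hc0]
      rw [if_pos hp] at hts
      have h1 : (splitSums (A.take (k + 1))).1 = (splitSums (A.take k)).1 + A.getD k 0 := by
        rw [hts]
      have h2 : (splitSums (A.take (k + 1))).2 = (splitSums (A.take k)).2 := by rw [hts]
      rcases Nat.eq_zero_or_pos k with rfl | hk0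
      · rw [if_neg (by simp)]
        simp only [Prod.mk.injEq]
        simp only [Nat.zero_sub, Nat.zero_add, List.take_zero, splitSums_nil,
          List.getD_eq_getElem?_getD] at h1 h2 ⊢
        refine ⟨trivial, trivial, by omega, by omega, ?_⟩
        split_ifs with hX hd hd
        · push_cast; ring
        · exfalso
          simp only [decide_eq_true_eq] at hd
          unfold CondA at hd
          simp only [List.take_zero, splitSums_nil, Nat.zero_add] at hd
          omega
        · exfalso
          simp only [decide_eq_true_eq] at hd
          unfold CondA at hd
          simp only [List.take_zero, splitSums_nil, Nat.zero_add] at hd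
          omega
        · push_cast; ring
      · -- k even and positive, so k - 1 is odd
        have hts' := ss_take_succ A (k - 1) (by omega)
        rw [if_neg (by omega), Nat.sub_add_cancel hk0] at hts'
        have h3 : (splitSums (A.take k)).1 = (splitSums (A.take (k - 1))).1 := by rw [hts']
        have h4 : (splitSums (A.take k)).2
            = (splitSums (A.take (k - 1))).2 + A.getD (k - 1) 0 := by rw [hts']
        have hcast : ((k : Int) - 1) = ((k - 1 : Nat) : Int) := by push_cast [hk0]; ring
        rw [if_pos (by exact_mod_cast hk0), hcast]
        simp only [PySem.List.pyGetD_natCast]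
        simp only [Prod.mk.injEq]
        refine ⟨by omega, by omega, by omega, by omega, ?_⟩
        by_cases hc : CondA A k
        · rw [if_pos (by unfold CondA at hc; omega)]
          simp [hc]
        · rw [if_neg (by unfold CondA at hc; omega)]
          simp [hc]
    · -- k odd, hence positive, and k - 1 is even
      have hk0 : 0 < k := by omega
      have hc0 : ¬ (((k % 2 : Nat) : Int) = 0) := by
        intro h; apply hp; exact_mod_cast h
      rw [if_neg hc0]
      rw [if_neg hp] at hts
      have h1 : (splitSums (A.take (k + 1))).1 = (splitSums (A.take k)).1 := by rw [hts]
      have h2 : (splitSums (A.take (k + 1))).2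
          = (splitSums (A.take k)).2 + A.getD k 0 := by rw [hts]
      have hts' := ss_take_succ A (k - 1) (by omega)
      rw [if_pos (by omega), Nat.sub_add_cancel hk0] at hts'
      have h3 : (splitSums (A.take k)).1
          = (splitSums (A.take (k - 1))).1 + A.getD (k - 1) 0 := by rw [hts']
      have h4 : (splitSums (A.take k)).2 = (splitSums (A.take (k - 1))).2 := by rw [hts']
      have hcast : ((k : Int) - 1) = ((k - 1 : Nat) : Int) := by push_cast [hk0]; ring
      rw [if_pos (by exact_mod_cast hk0), hcast]
      simp only [PySem.List.pyGetD_natCast]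
      simp only [Prod.mk.injEq]
      refine ⟨by omega, by omega, by omega, by omega, ?_⟩
      by_cases hc : CondA A k
      · rw [if_pos (by unfold CondA at hc; omega)]
        simp [hc]
      · rw [if_neg (by unfold CondA at hc; omega)]
        simp [hc]

theorem solve_eq (A : List Int) :
    solve A = ((List.range A.length).countP (fun i => decide (CondA A i)) : Int) := by
  simp only [solve]
  rw [PySem.List.pyRange_zero_natCast]
  have hfil : (List.map (fun k : Nat => (k : Int)) (List.range A.length)).filter
      (fun i => decide (PySem.Int.mod i 2 = 0))
      = List.map (fun k : Nat => (k : Int)) ((List.range A.length).filter (fun j => j % 2 = 0)) := by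
    rw [List.filter_map]
    congr 1
    apply List.filter_congr
    intro j _
    simp [Function.comp]
    omega
  have he : ((((List.map (fun k : Nat => (k : Int)) (List.range A.length)).filter
      (fun i => decide (PySem.Int.mod i 2 = 0))).map (fun i => PySem.List.pyGetD A i 0)).sum)
      = (splitSums A).1 := by
    rw [hfil, List.map_map]
    have : ((fun i => PySem.List.pyGetD A i 0) ∘ fun k : Nat => (k : Int))
        = fun j : Nat => A.getD j 0 := by
      funext j; simp
    rw [this]
    have := even_total_eq A A.length le_rfl
    rwa [List.take_length] at this
  rw [he]
  have ho : A.sum - (splitSums A).1 = (splitSums A).2 := by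
    have := splitSums_sum A; omega
  rw [ho, foldA A A.length le_rfl]

theorem solve_alt_eq (A : List Int) :
    solve_alt A = ((List.range A.length).countP (fun i => decide (CondB A i)) : Int) := by
  unfold solve_alt
  rw [PySem.List.pyRange_zero_natCast]
  exact foldB A A.length le_rfl

-- ===== VERDICT (by name: the statement is the Claim_ definition above) =====
theorem solve_spec : Claim_equal_solve := by
  intro A _
  unfold Spec_solve
  have h : (List.range A.length).countP (fun i => decide (CondA A i))
      = (List.range A.length).countP (fun i => decide (CondB A i)) := by
    apply List.countP_congr
    intro i hi
    simp only [List.mem_range] at hi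
    simp [condA_iff_condB A i hi]
  rw [solve_eq, solve_alt_eq, h]
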